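-- pv_equiv track=rewrite | github.com/The-AnonymousCoder/VGAT-B | zzContrastExperiment/Tan24/Fig4.py | construction_fast
-- ===== SOURCE A (Python) =====
-- from typing import Dict, List, Tuple
--
-- def construction_fast(Xlist: List[List[float]], feature_num: int, Lst_WaterMark: List[int]):
--     """与 Fig1 相同的 O(W^2) 组合计数加速构造。"""
--     W = len(Lst_WaterMark)
--     counts_even = [0] * W
--     counts_odd = [0] * W
--     for coords in Xlist:
--         Ni = len(coords)
--         r = Ni % W
--         if (Ni % 2) == 0:
--             counts_even[r] += 1
--         else:
--             counts_odd[r] += 1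
--     categories = []
--     for r in range(W):
--         if counts_even[r]:
--             categories.append((r, 0, counts_even[r]))
--         if counts_odd[r]:
--             categories.append((r, 1, counts_odd[r]))
--     acc = [0] * W
--     for i in range(len(categories)):
--         r1, p1, c1 = categories[i]
--         if c1 >= 2:
--             k = (r1 * r1) % W
--             acc[k] += (c1 * (c1 - 1) // 2)
--         for j in range(i + 1, len(categories)):
--             r2, p2, c2 = categories[j]
--             k = (r1 * r2) % W
--             acc[k] += (c1 * c2) if (p1 == p2) else -(c1 * c2)
--     return [255 if v > 0 else 0 for v in acc]
-- ===== SOURCE B (Python) =====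
-- def construction_fast(Xlist, feature_num, Lst_WaterMark):
--     W = len(Lst_WaterMark)
--     D = [0] * W   # per-residue signed count: even-length minus odd-length
--     T = [0] * W   # per-residue total count
--     for coords in Xlist:
--         n = len(coords)
--         r = n % W
--         D[r] += 1 if n % 2 == 0 else -1
--         T[r] += 1
--     R = [r for r in range(W) if T[r] != 0]   # occupied residues
--     acc = [0] * W
--     for i in range(len(R)):
--         r1 = R[i]
--         acc[(r1 * r1) % W] += (D[r1] * D[r1] - T[r1]) // 2
--         for j in range(i + 1, len(R)):
--             r2 = R[j]
--             acc[(r1 * r2) % W] += D[r1] * D[r2]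
--     return [255 if v > 0 else 0 for v in acc]
-- ===== Notes on version B (the rewrite author's own statement) =====
-- stated objective: simpler
-- what changed: B drops A's parity-tagged category list and its sign-branching pair loop: it keeps one signed count D[r] = #even - #odd (plus a total T[r]) per residue and accumulates (D[r1]^2 - T[r1]) // 2 on the diagonal and D[r1]*D[r2] for pairs of occupied residues, eliminating the parity dimension and the same/different-parity branch.
import Mathlib
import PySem

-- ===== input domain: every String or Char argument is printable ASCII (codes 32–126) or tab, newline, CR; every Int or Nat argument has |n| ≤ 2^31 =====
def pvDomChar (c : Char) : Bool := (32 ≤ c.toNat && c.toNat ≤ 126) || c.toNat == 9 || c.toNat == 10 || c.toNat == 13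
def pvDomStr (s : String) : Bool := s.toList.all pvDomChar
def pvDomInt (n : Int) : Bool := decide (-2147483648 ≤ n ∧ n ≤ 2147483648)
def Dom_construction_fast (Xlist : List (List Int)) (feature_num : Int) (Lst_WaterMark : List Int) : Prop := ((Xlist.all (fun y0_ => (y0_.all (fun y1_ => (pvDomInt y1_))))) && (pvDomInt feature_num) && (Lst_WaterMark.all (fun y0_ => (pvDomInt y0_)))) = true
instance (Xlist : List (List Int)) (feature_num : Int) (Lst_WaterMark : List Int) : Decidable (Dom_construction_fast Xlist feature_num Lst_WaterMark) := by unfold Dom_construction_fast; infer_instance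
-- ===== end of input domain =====

-- B replaces A's parity-tagged category list and its signed pair loop by one signed count D[r] = (#even − #odd)
-- per residue and a plain double loop over the W residues (same output; objective: simpler).

-- ===== PORT A =====
-- shared low-level helper: Python's 'acc[k] += v' (exact here: both programs only use it with 0 ≤ k < len acc)
def bump (acc : List Int) (k : Nat) (v : Int) : List Int :=
  acc.set k (acc.getD k 0 + v)

-- A's first loop: counts_even / counts_odd
def countsLoopA (W : Nat) (Xlist : List (List Int)) : List Int × List Int :=
  Xlist.foldl (fun (p : List Int × List Int) coords =>
      if coords.length % 2 == 0 then (bump p.1 (coords.length % W) 1, p.2)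
      else (p.1, bump p.2 (coords.length % W) 1))
    (List.replicate W 0, List.replicate W 0)

-- A's categories-building loop
def categoriesOf (W : Nat) (ce co : List Int) : List (Nat × Nat × Int) :=
  (List.range W).foldl (fun cats r =>
      let cats1 := if ce.getD r 0 ≠ 0 then cats ++ [(r, 0, ce.getD r 0)] else cats
      if co.getD r 0 ≠ 0 then cats1 ++ [(r, 1, co.getD r 0)] else cats1) []

-- A's i/j index loops over categories (j over i+1..len-1), rendered as head/tail recursion
def catPairLoop (W : Nat) : List (Nat × Nat × Int) → List Int → List Int
  | [], acc => acc
  | (r1, p1, c1) :: rest, acc =>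
    let acc1 := if 2 ≤ c1 then bump acc ((r1 * r1) % W) (PySem.Int.floordiv (c1 * (c1 - 1)) 2) else acc
    let acc2 := rest.foldl (fun a x =>
        bump a ((r1 * x.1) % W) (if p1 == x.2.1 then c1 * x.2.2 else -(c1 * x.2.2))) acc1
    catPairLoop W rest acc2

def construction_fast (Xlist : List (List Int)) (feature_num : Int) (Lst_WaterMark : List Int) : List Int :=
  let W := Lst_WaterMark.length
  let counts := countsLoopA W Xlist
  let categories := categoriesOf W counts.1 counts.2
  (catPairLoop W categories (List.replicate W 0)).map (fun v => if 0 < v then 255 else 0)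

-- ===== PORT B =====
-- B's first loop: D[r] = signed count (even minus odd lengths), T[r] = total count, per residue
def dtLoopB (W : Nat) (Xlist : List (List Int)) : List Int × List Int :=
  Xlist.foldl (fun (p : List Int × List Int) coords =>
      (bump p.1 (coords.length % W) (if coords.length % 2 == 0 then 1 else -1),
       bump p.2 (coords.length % W) 1))
    (List.replicate W 0, List.replicate W 0)

-- B's i/j index loops over the occupied residues R (j over i+1..len-1), rendered as head/tail recursion
def accPairLoopB (W : Nat) (D T : List Int) : List Nat → List Int → List Int
  | [], acc => acc
  | r1 :: rest, acc =>
    let acc1 := bump acc ((r1 * r1) % W)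
      (PySem.Int.floordiv (D.getD r1 0 * D.getD r1 0 - T.getD r1 0) 2)
    let acc2 := rest.foldl (fun a r2 => bump a ((r1 * r2) % W) (D.getD r1 0 * D.getD r2 0)) acc1
    accPairLoopB W D T rest acc2

def construction_fast_alt (Xlist : List (List Int)) (feature_num : Int) (Lst_WaterMark : List Int) : List Int :=
  let W := Lst_WaterMark.length
  let DT := dtLoopB W Xlist
  let R := (List.range W).filter (fun r => DT.2.getD r 0 != 0)
  (accPairLoopB W DT.1 DT.2 R (List.replicate W 0)).map (fun v => if 0 < v then 255 else 0)

-- ===== PRECONDITION & SPEC =====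
-- Pre_ excludes only Lst_WaterMark = [] with nonempty Xlist: there Python A raises ZeroDivisionError (len % 0), and so does B.
def Pre_construction_fast (Xlist : List (List Int)) (feature_num : Int) (Lst_WaterMark : List Int) : Prop :=
  Xlist = [] ∨ Lst_WaterMark ≠ []
instance (Xlist : List (List Int)) (feature_num : Int) (Lst_WaterMark : List Int) : Decidable (Pre_construction_fast Xlist feature_num Lst_WaterMark) := by unfold Pre_construction_fast; infer_instance

def pvWitness_construction_fast : List (List Int) × Int × List Int :=
  ([[1], [1, 1], [], [2, 3]], 0, [5, 6, 7])

def Spec_construction_fast (Xlist : List (List Int)) (feature_num : Int) (Lst_WaterMark : List Int) (out : List Int) : Prop := out = construction_fast_alt Xlist feature_num Lst_WaterMark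
instance (Xlist : List (List Int)) (feature_num : Int) (Lst_WaterMark : List Int) (out : List Int) : Decidable (Spec_construction_fast Xlist feature_num Lst_WaterMark out) := by unfold Spec_construction_fast; infer_instance

-- ===== CLAIM (what is proved, stated in full; the proofs are below) =====
def Claim_equal_construction_fast : Prop := ∀ (Xlist : List (List Int)) (feature_num : Int) (Lst_WaterMark : List Int), Dom_construction_fast Xlist feature_num Lst_WaterMark → Pre_construction_fast Xlist feature_num Lst_WaterMark → Spec_construction_fast Xlist feature_num Lst_WaterMark (construction_fast Xlist feature_num Lst_WaterMark)

-- ===== LEMMAS AND PROOFS =====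

-- proof-side views of the two accumulation loops as one flat list of (key, value) increments
def applyAll (acc : List Int) (C : List (Nat × Int)) : List Int :=
  C.foldl (fun a kv => bump a kv.1 kv.2) acc

def contribsA (W : Nat) : List (Nat × Nat × Int) → List (Nat × Int)
  | [] => []
  | (r1, p1, c1) :: rest =>
    (if 2 ≤ c1 then [((r1 * r1) % W, PySem.Int.floordiv (c1 * (c1 - 1)) 2)] else [])
    ++ rest.map (fun x => ((r1 * x.1) % W, if p1 == x.2.1 then c1 * x.2.2 else -(c1 * x.2.2)))
    ++ contribsA W rest

def contribsB (W : Nat) (D T : List Int) : List Nat → List (Nat × Int)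
  | [] => []
  | r1 :: rest =>
    ((r1 * r1) % W, PySem.Int.floordiv (D.getD r1 0 * D.getD r1 0 - T.getD r1 0) 2)
    :: (rest.map (fun r2 => ((r1 * r2) % W, D.getD r1 0 * D.getD r2 0)) ++ contribsB W D T rest)

-- total increment a contribution list puts at slot m
def SS (m : Nat) (C : List (Nat × Int)) : Int :=
  (C.map (fun kv => if m = kv.1 then kv.2 else 0)).sum

def gval (W m : Nat) (x y : Nat × Nat × Int) : Int :=
  if m = (x.1 * y.1) % W then (if x.2.1 == y.2.1 then x.2.2 * y.2.2 else -(x.2.2 * y.2.2)) else 0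

def dval (W m : Nat) (x : Nat × Nat × Int) : Int :=
  if 2 ≤ x.2.2 then (if m = (x.1 * x.1) % W then PySem.Int.floordiv (x.2.2 * (x.2.2 - 1)) 2 else 0) else 0

def gB (W m : Nat) (D : List Int) (r1 r2 : Nat) : Int :=
  if m = (r1 * r2) % W then D.getD r1 0 * D.getD r2 0 else 0

-- the (at most two) category entries residue r produces
def block (ce co : List Int) (r : Nat) : List (Nat × Nat × Int) :=
  (if ce.getD r 0 ≠ 0 then [(r, 0, ce.getD r 0)] else [])
  ++ (if co.getD r 0 ≠ 0 then [(r, 1, co.getD r 0)] else [])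

lemma getD_replicate_zero (W m : Nat) : (List.replicate W (0:Int)).getD m 0 = 0 := by
  rcases Nat.lt_or_ge m W with h | h
  · exact List.getD_replicate _ h
  · exact List.getD_eq_default _ _ (by simpa using h)

lemma bump_length (l : List Int) (k : Nat) (v : Int) : (bump l k v).length = l.length := by
  simp [bump]

lemma bump_getD (l : List Int) (k : Nat) (v : Int) (hk : k < l.length) (m : Nat) :
    (bump l k v).getD m 0 = l.getD m 0 + if m = k then v else 0 := by
  unfold bump
  rw [List.getD_eq_getElem?_getD, List.getD_eq_getElem?_getD, List.getElem?_set]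
  by_cases h : m = k
  · subst h
    simp [hk, List.getD_eq_getElem _ _ hk]
  · rw [if_neg (fun hh : k = m => h hh.symm), if_neg h]
    simp

lemma foldl_cbump_length {α : Type} (P : α → Bool) (key : α → Nat) (val : α → Int) :
    ∀ (L : List α) (acc : List Int),
      (L.foldl (fun a x => if P x then bump a (key x) (val x) else a) acc).length = acc.length := by
  intro L
  induction L with
  | nil => intro acc; rfl
  | cons x L ih =>
      intro acc
      by_cases h : P x <;> simp [h, ih, bump_length]

lemma foldl_cbump_getD {α : Type} (P : α → Bool) (key : α → Nat) (val : α → Int) :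
    ∀ (L : List α) (acc : List Int), (∀ x ∈ L, key x < acc.length) → ∀ m,
      (L.foldl (fun a x => if P x then bump a (key x) (val x) else a) acc).getD m 0
        = acc.getD m 0 + (L.map (fun x => if P x ∧ m = key x then val x else 0)).sum := by
  intro L
  induction L with
  | nil => intro acc _ m; simp
  | cons x L ih =>
      intro acc hk m
      by_cases h : P x
      · have hx : key x < acc.length := hk x (by simp)
        have hk' : ∀ y ∈ L, key y < (bump acc (key x) (val x)).length := by
          intro y hy; rw [bump_length]; exact hk y (by simp [hy])
        simp only [List.foldl_cons, h, if_pos]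
        rw [ih _ hk' m, bump_getD _ _ _ hx m]
        by_cases hm : m = key x <;> simp [hm, h] <;> ring
      · have hk' : ∀ y ∈ L, key y < acc.length := fun y hy => hk y (by simp [hy])
        simp only [List.foldl_cons, h, if_neg, Bool.false_eq_true, not_false_iff, ite_false]
        rw [ih _ hk' m]
        simp [h]

lemma applyAll_length (acc : List Int) (C : List (Nat × Int)) :
    (applyAll acc C).length = acc.length := by
  have h : (fun (a : List Int) (kv : Nat × Int) => bump a kv.1 kv.2)
      = (fun a kv => if (fun (_ : Nat × Int) => true) kv then bump a kv.1 kv.2 else a) := by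
    funext a kv; simp
  rw [applyAll, h, foldl_cbump_length]

lemma applyAll_getD (acc : List Int) (C : List (Nat × Int))
    (hk : ∀ kv ∈ C, kv.1 < acc.length) (m : Nat) :
    (applyAll acc C).getD m 0 = acc.getD m 0 + SS m C := by
  have h : (fun (a : List Int) (kv : Nat × Int) => bump a kv.1 kv.2)
      = (fun a kv => if (fun (_ : Nat × Int) => true) kv then bump a kv.1 kv.2 else a) := by
    funext a kv; simp
  rw [applyAll, h, foldl_cbump_getD _ _ _ _ _ hk m, SS]
  simp

lemma applyAll_append (acc : List Int) (C1 C2 : List (Nat × Int)) :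
    applyAll acc (C1 ++ C2) = applyAll (applyAll acc C1) C2 := by
  simp [applyAll, List.foldl_append]

lemma catPairLoop_eq (W : Nat) :
    ∀ (cats : List (Nat × Nat × Int)) (acc : List Int),
      catPairLoop W cats acc = applyAll acc (contribsA W cats) := by
  intro cats
  induction cats with
  | nil => intro acc; rfl
  | cons x rest ih =>
      intro acc
      obtain ⟨r1, p1, c1⟩ := x
      have h1 : (if 2 ≤ c1 then bump acc ((r1 * r1) % W) (PySem.Int.floordiv (c1 * (c1 - 1)) 2) else acc)
          = applyAll acc (if 2 ≤ c1 then [((r1 * r1) % W, PySem.Int.floordiv (c1 * (c1 - 1)) 2)] else []) := by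
        by_cases h : 2 ≤ c1 <;> simp [h, applyAll]
      simp only [catPairLoop, contribsA]
      rw [applyAll_append, applyAll_append, ih, ← h1]
      congr 1
      simp [applyAll, List.foldl_map]

lemma accPairLoopB_eq (W : Nat) (D T : List Int) :
    ∀ (rs : List Nat) (acc : List Int),
      accPairLoopB W D T rs acc = applyAll acc (contribsB W D T rs) := by
  intro rs
  induction rs with
  | nil => intro acc; rfl
  | cons r1 rest ih =>
      intro acc
      simp only [accPairLoopB, contribsB]
      rw [show ((r1 * r1) % W, PySem.Int.floordiv (D.getD r1 0 * D.getD r1 0 - T.getD r1 0) 2)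
            :: (rest.map (fun r2 => ((r1 * r2) % W, D.getD r1 0 * D.getD r2 0)) ++ contribsB W D T rest)
          = [((r1 * r1) % W, PySem.Int.floordiv (D.getD r1 0 * D.getD r1 0 - T.getD r1 0) 2)]
            ++ (rest.map (fun r2 => ((r1 * r2) % W, D.getD r1 0 * D.getD r2 0)) ++ contribsB W D T rest)
          from rfl,
        applyAll_append, applyAll_append, ih]
      congr 1
      · simp [applyAll, List.foldl_map]

lemma SS_append (m : Nat) (C1 C2 : List (Nat × Int)) : SS m (C1 ++ C2) = SS m C1 + SS m C2 := by
  simp [SS]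

lemma PS_cons (W m : Nat) (x : Nat × Nat × Int) (rest : List (Nat × Nat × Int)) :
    SS m (contribsA W (x :: rest))
      = dval W m x + (rest.map (fun y => gval W m x y)).sum + SS m (contribsA W rest) := by
  obtain ⟨r1, p1, c1⟩ := x
  have e1 : SS m (if 2 ≤ c1 then [((r1 * r1) % W, PySem.Int.floordiv (c1 * (c1 - 1)) 2)] else [])
      = dval W m (r1, p1, c1) := by
    by_cases h : 2 ≤ c1 <;> simp [h, SS, dval]
  have e2 : SS m (rest.map (fun x =>
        ((r1 * x.1) % W, if p1 == x.2.1 then c1 * x.2.2 else -(c1 * x.2.2))))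
      = (rest.map (fun y => gval W m (r1, p1, c1) y)).sum := by
    simp only [SS, List.map_map]
    rfl
  rw [contribsA, SS_append, SS_append, e1, e2]

lemma PS_append (W m : Nat) :
    ∀ (L1 L2 : List (Nat × Nat × Int)),
      SS m (contribsA W (L1 ++ L2))
        = SS m (contribsA W L1) + SS m (contribsA W L2)
          + (L1.map (fun x => (L2.map (fun y => gval W m x y)).sum)).sum := by
  intro L1
  induction L1 with
  | nil => intro L2; simp [contribsA, SS]
  | cons x L1 ih =>
      intro L2
      rw [List.cons_append, PS_cons, PS_cons, ih, List.map_append, List.sum_append,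
        List.map_cons, List.sum_cons]
      ring

lemma QB_cons (W m : Nat) (D T : List Int) (r : Nat) (rest : List Nat) :
    SS m (contribsB W D T (r :: rest))
      = (if m = (r * r) % W then PySem.Int.floordiv (D.getD r 0 * D.getD r 0 - T.getD r 0) 2 else 0)
        + (rest.map (fun r2 => gB W m D r r2)).sum + SS m (contribsB W D T rest) := by
  have e2 : SS m (rest.map (fun r2 => ((r * r2) % W, D.getD r 0 * D.getD r2 0)))
      = (rest.map (fun r2 => gB W m D r r2)).sum := by
    simp only [SS, List.map_map]
    rfl
  rw [contribsB,
    show ((r * r) % W, PySem.Int.floordiv (D.getD r 0 * D.getD r 0 - T.getD r 0) 2)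
        :: (rest.map (fun r2 => ((r * r2) % W, D.getD r 0 * D.getD r2 0)) ++ contribsB W D T rest)
      = [((r * r) % W, PySem.Int.floordiv (D.getD r 0 * D.getD r 0 - T.getD r 0) 2)]
        ++ (rest.map (fun r2 => ((r * r2) % W, D.getD r 0 * D.getD r2 0)) ++ contribsB W D T rest)
      from rfl,
    SS_append, SS_append, e2]
  have e1 : SS m [((r * r) % W, PySem.Int.floordiv (D.getD r 0 * D.getD r 0 - T.getD r 0) 2)]
      = (if m = (r * r) % W then PySem.Int.floordiv (D.getD r 0 * D.getD r 0 - T.getD r 0) 2 else 0) := by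
    simp [SS]
  rw [e1]
  ring

-- arithmetic core for the diagonal: C(a,2)+C(b,2)-ab = ((a-b)^2-(a+b)) // 2 (both sides exact: numerators even)
lemma diag_arith (a b : Int) :
    PySem.Int.floordiv (a * (a - 1)) 2 + PySem.Int.floordiv (b * (b - 1)) 2 - a * b
    = PySem.Int.floordiv ((a - b) * (a - b) - (a + b)) 2 := by
  obtain ⟨u, hu⟩ : Even (a * (a - 1)) := by
    have := Int.even_mul_succ_self (a - 1)
    simpa [mul_comm, sub_add_cancel] using this
  obtain ⟨v, hv⟩ : Even (b * (b - 1)) := by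
    have := Int.even_mul_succ_self (b - 1)
    simpa [mul_comm, sub_add_cancel] using this
  have h2 : (0:Int) < 2 := by norm_num
  have e1 : PySem.Int.floordiv (a * (a - 1)) 2 = u := by
    rw [PySem.Int.floordiv_eq_ediv_of_pos h2, hu, show u + u = 2 * u by ring,
      Int.mul_ediv_cancel_left u two_ne_zero]
  have e2 : PySem.Int.floordiv (b * (b - 1)) 2 = v := by
    rw [PySem.Int.floordiv_eq_ediv_of_pos h2, hv, show v + v = 2 * v by ring,
      Int.mul_ediv_cancel_left v two_ne_zero]
  have e3 : PySem.Int.floordiv ((a - b) * (a - b) - (a + b)) 2 = u + v - a * b := by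
    rw [PySem.Int.floordiv_eq_ediv_of_pos h2,
      show (a - b) * (a - b) - (a + b) = 2 * (u + v - a * b) by linear_combination hu + hv,
      Int.mul_ediv_cancel_left _ two_ne_zero]
  rw [e1, e2, e3]

-- for a count c >= 0 the 'if c >= 2' guard on C(c,2) is redundant
lemma dval_eq (W m r p : Nat) (c : Int) (hc : 0 ≤ c) :
    dval W m (r, p, c) = if m = (r * r) % W then PySem.Int.floordiv (c * (c - 1)) 2 else 0 := by
  by_cases h : 2 ≤ c
  · simp [dval, h]
  · have hc01 : c = 0 ∨ c = 1 := by omega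
    rcases hc01 with h0 | h0 <;> subst h0 <;>
      simp [dval, h, show PySem.Int.floordiv 0 2 = 0 from by decide]

-- a sum over a block equals the sum over both potential entries, when the summand vanishes at count 0
lemma block_sum (ce co : List Int) (r : Nat) (f : Nat × Nat × Int → Int)
    (h0 : ∀ p : Nat, f (r, p, 0) = 0) :
    ((block ce co r).map f).sum = f (r, 0, ce.getD r 0) + f (r, 1, co.getD r 0) := by
  obtain ⟨a, ha⟩ : ∃ a, ce.getD r 0 = a := ⟨_, rfl⟩
  obtain ⟨b, hb⟩ : ∃ b, co.getD r 0 = b := ⟨_, rfl⟩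
  unfold block
  rw [ha, hb]
  by_cases h1 : a = 0 <;> by_cases h2 : b = 0 <;> simp [h1, h2, h0]

-- diagonal: the within-block contributions of residue r
lemma block_diag (W m : Nat) (ce co : List Int) (r : Nat)
    (hce : 0 ≤ ce.getD r 0) (hco : 0 ≤ co.getD r 0) :
    SS m (contribsA W (block ce co r))
      = if m = (r * r) % W then
          PySem.Int.floordiv
            ((ce.getD r 0 - co.getD r 0) * (ce.getD r 0 - co.getD r 0)
              - (ce.getD r 0 + co.getD r 0)) 2
        else 0 := by
  obtain ⟨a, ha⟩ : ∃ a, ce.getD r 0 = a := ⟨_, rfl⟩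
  obtain ⟨b, hb⟩ : ∃ b, co.getD r 0 = b := ⟨_, rfl⟩
  rw [ha] at hce
  rw [hb] at hco
  have key := diag_arith a b
  have f0 : PySem.Int.floordiv 0 2 = 0 := by decide
  unfold block
  rw [ha, hb]
  by_cases h1 : a = 0 <;> by_cases h2 : b = 0
  · subst h1; subst h2
    simp [contribsA, SS]
  · subst h1
    rw [if_neg (by simp), if_pos h2, List.nil_append, PS_cons, dval_eq W m r 1 b hco]
    simp only [contribsA, SS, List.map_nil, List.sum_nil, add_zero]
    by_cases hm : m = r * r % W
    · simp only [hm, if_true]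
      ring_nf
    · simp [hm]
  · subst h2
    rw [if_pos h1, if_neg (by simp), List.append_nil, PS_cons, dval_eq W m r 0 a hce]
    simp only [contribsA, SS, List.map_nil, List.sum_nil, add_zero]
    by_cases hm : m = r * r % W
    · simp only [hm, if_true]
      ring_nf
    · simp [hm]
  · rw [if_pos h1, if_pos h2, List.singleton_append, PS_cons, PS_cons,
      dval_eq W m r 0 a hce, dval_eq W m r 1 b hco]
    simp only [contribsA, SS, List.map_nil, List.sum_nil, add_zero, List.map_cons,
      List.sum_cons, gval]
    simp only [show ((0:Nat) == 1) = false from rfl, Bool.false_eq_true, if_false]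
    by_cases hm : m = r * r % W
    · simp only [hm, eq_self_iff_true, if_true]
      ring_nf
      ring_nf at key
      linarith
    · simp [hm]

-- cross: signed pair contributions between the blocks of two residues multiply out to D(r1)*D(r2)
lemma block_cross (W m : Nat) (ce co : List Int) (r1 r2 : Nat) :
    ((block ce co r1).map (fun x => ((block ce co r2).map (fun y => gval W m x y)).sum)).sum
      = if m = (r1 * r2) % W then
          (ce.getD r1 0 - co.getD r1 0) * (ce.getD r2 0 - co.getD r2 0)
        else 0 := by
  have hz2 : ∀ (p q : Nat) (c : Int), gval W m (r1, p, c) (r2, q, 0) = 0 := by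
    intro p q c
    by_cases hm : m = (r1 * r2) % W <;> simp [gval, hm]
  have hz1 : ∀ p : Nat, ((block ce co r2).map (fun y => gval W m (r1, p, 0) y)).sum = 0 := by
    intro p
    rw [block_sum ce co r2 _ (fun q => hz2 p q 0)]
    by_cases hm : m = (r1 * r2) % W <;> simp [gval, hm]
  rw [block_sum ce co r1 _ hz1,
    block_sum ce co r2 _ (fun q => hz2 0 q _),
    block_sum ce co r2 _ (fun q => hz2 1 q _)]
  by_cases hm : m = (r1 * r2) % W <;> simp [gval, hm] <;> ring

-- summing the cross contributions over the flattened later blocks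
lemma cross_flat (W m : Nat) (ce co : List Int) (r : Nat) :
    ∀ rest : List Nat,
      ((block ce co r).map
          (fun x => ((rest.flatMap (block ce co)).map (fun y => gval W m x y)).sum)).sum
        = (rest.map (fun r2 =>
            if m = (r * r2) % W then
              (ce.getD r 0 - co.getD r 0) * (ce.getD r2 0 - co.getD r2 0)
            else 0)).sum := by
  intro rest
  induction rest with
  | nil => simp
  | cons r2 rest ih =>
      rw [List.flatMap_cons, List.map_cons, List.sum_cons]
      simp only [List.map_append, List.sum_append]
      rw [PySem.List.sum_map_add_int (block ce co r)
          (fun x => ((block ce co r2).map (fun y => gval W m x y)).sum)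
          (fun x => ((rest.flatMap (block ce co)).map (fun y => gval W m x y)).sum),
        ih, block_cross]

-- the combinatorial core: A's pair sum over flattened blocks = B's residue-pair sum
lemma core (W m : Nat) (ce co D T : List Int)
    (hnn : ∀ r : Nat, 0 ≤ ce.getD r 0 ∧ 0 ≤ co.getD r 0)
    (hD : ∀ r : Nat, D.getD r 0 = ce.getD r 0 - co.getD r 0)
    (hT : ∀ r : Nat, T.getD r 0 = ce.getD r 0 + co.getD r 0) :
    ∀ rs : List Nat,
      SS m (contribsA W (rs.flatMap (block ce co))) = SS m (contribsB W D T rs) := by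
  intro rs
  induction rs with
  | nil => simp [contribsA, contribsB, SS]
  | cons r rest ih =>
      have hgB : ∀ r2 : Nat, gB W m D r r2
          = if m = (r * r2) % W then
              (ce.getD r 0 - co.getD r 0) * (ce.getD r2 0 - co.getD r2 0)
            else 0 := by
        intro r2
        rw [gB, hD r, hD r2]
      rw [List.flatMap_cons, PS_append, QB_cons, ih, cross_flat,
        block_diag W m ce co r (hnn r).1 (hnn r).2, hD r, hT r]
      simp only [hgB]
      ring

-- dropping elements whose summand is 0 does not change a sum
lemma sum_map_filter (p : Nat → Bool) (f : Nat → Int) :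
    ∀ L : List Nat, (∀ x ∈ L, p x = false → f x = 0) →
      ((L.filter p).map f).sum = (L.map f).sum := by
  intro L
  induction L with
  | nil => intro _; rfl
  | cons x L ih =>
      intro h0
      by_cases hp : p x
      · rw [List.filter_cons_of_pos hp, List.map_cons, List.sum_cons, List.map_cons,
          List.sum_cons, ih (fun y hy => h0 y (List.mem_cons_of_mem _ hy))]
      · rw [List.filter_cons_of_neg (by simpa using hp), List.map_cons, List.sum_cons,
          h0 x (List.mem_cons_self) (by simpa using hp), zero_add,
          ih (fun y hy => h0 y (List.mem_cons_of_mem _ hy))]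

-- residues with total count 0 (hence signed count 0) contribute nothing to B's accumulation
lemma contribsB_filter (W m : Nat) (D T : List Int)
    (hz : ∀ r : Nat, T.getD r 0 = 0 → D.getD r 0 = 0) :
    ∀ rs : List Nat,
      SS m (contribsB W D T (rs.filter (fun r => T.getD r 0 != 0)))
        = SS m (contribsB W D T rs) := by
  intro rs
  induction rs with
  | nil => rfl
  | cons r rest ih =>
      by_cases h : T.getD r 0 = 0
      · have h' : (T.getD r 0 != 0) = false := by rw [h]; rfl
        have hf : List.filter (fun r => T.getD r 0 != 0) (r :: rest)
            = List.filter (fun r => T.getD r 0 != 0) rest := by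
          rw [List.filter_cons, h']
          rfl
        rw [hf, ih, QB_cons, hz r h, h]
        have hg : ∀ r2 : Nat, gB W m D r r2 = 0 := by
          intro r2
          rw [gB, hz r h]
          simp
        simp only [hg, mul_zero, sub_zero,
          show PySem.Int.floordiv 0 2 = 0 from by decide]
        simp
      · have h' : (T.getD r 0 != 0) = true := by simpa [bne_iff_ne] using h
        have hf : List.filter (fun r => T.getD r 0 != 0) (r :: rest)
            = r :: List.filter (fun r => T.getD r 0 != 0) rest := by
          rw [List.filter_cons, h']
          rfl
        rw [hf, QB_cons, QB_cons, ih]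
        congr 2
        exact sum_map_filter _ _ rest (fun x _ hx => by
          have hx0 : T.getD x 0 = 0 := by
            have := hx
            simp only [bne_eq_false_iff_eq] at this
            exact this
          rw [gB, hz x hx0]
          simp)

-- categories is the concatenation of the per-residue blocks
lemma categoriesOf_eq (W : Nat) (ce co : List Int) :
    categoriesOf W ce co = (List.range W).flatMap (block ce co) := by
  have h : ∀ (L : List Nat) (init : List (Nat × Nat × Int)),
      L.foldl (fun cats r =>
        let cats1 := if ce.getD r 0 ≠ 0 then cats ++ [(r, 0, ce.getD r 0)] else cats
        if co.getD r 0 ≠ 0 then cats1 ++ [(r, 1, co.getD r 0)] else cats1) init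
      = init ++ L.flatMap (block ce co) := by
    intro L
    induction L with
    | nil => intro init; simp
    | cons r L ih =>
        intro init
        rw [List.foldl_cons, ih, List.flatMap_cons]
        obtain ⟨a, ha⟩ : ∃ a, ce.getD r 0 = a := ⟨_, rfl⟩
        obtain ⟨b, hb⟩ : ∃ b, co.getD r 0 = b := ⟨_, rfl⟩
        unfold block
        rw [ha, hb]
        by_cases h1 : a = 0 <;> by_cases h2 : b = 0 <;> simp [h1, h2]
  rw [categoriesOf, h]
  rfl

-- keys produced by the two contribution lists are in range
lemma contribsA_keys (W : Nat) (hW : 0 < W) :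
    ∀ cats : List (Nat × Nat × Int), ∀ kv ∈ contribsA W cats, kv.1 < W := by
  intro cats
  induction cats with
  | nil => intro kv h; simp [contribsA] at h
  | cons x rest ih =>
      obtain ⟨r1, p1, c1⟩ := x
      intro kv h
      rw [contribsA] at h
      simp only [List.mem_append] at h
      rcases h with (h | h) | h
      · by_cases hc : 2 ≤ c1
        · simp [hc] at h
          rw [h]
          exact Nat.mod_lt _ hW
        · simp [hc] at h
      · simp only [List.mem_map] at h
        obtain ⟨y, _, hy⟩ := h
        rw [← hy]
        exact Nat.mod_lt _ hW
      · exact ih kv h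

lemma contribsB_keys (W : Nat) (hW : 0 < W) (D T : List Int) :
    ∀ rs : List Nat, ∀ kv ∈ contribsB W D T rs, kv.1 < W := by
  intro rs
  induction rs with
  | nil => intro kv h; simp [contribsB] at h
  | cons r rest ih =>
      intro kv h
      rw [contribsB] at h
      simp only [List.mem_cons, List.mem_append] at h
      rcases h with h | h | h
      · rw [h]; exact Nat.mod_lt _ hW
      · simp only [List.mem_map] at h
        obtain ⟨y, _, hy⟩ := h
        rw [← hy]
        exact Nat.mod_lt _ hW
      · exact ih kv h

-- unconditional-bump instances of the master fold lemma
lemma foldl_bump_getD' {α : Type} (key : α → Nat) (val : α → Int) (L : List α) (acc : List Int)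
    (hk : ∀ x ∈ L, key x < acc.length) (m : Nat) :
    (L.foldl (fun a x => bump a (key x) (val x)) acc).getD m 0
      = acc.getD m 0 + (L.map (fun x => if m = key x then val x else 0)).sum := by
  have h : (fun (a : List Int) x => bump a (key x) (val x))
      = (fun a x => if (fun (_ : α) => true) x then bump a (key x) (val x) else a) := by
    funext a x; simp
  rw [h, foldl_cbump_getD _ _ _ _ _ hk m]
  simp

-- ===== VERDICT (by name: the statement is the Claim_ definition above) =====
theorem construction_fast_spec : Claim_equal_construction_fast := by
  intro Xlist feature_num Lst_WaterMark _ hpre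
  unfold Spec_construction_fast
  by_cases hL : Lst_WaterMark = []
  · have hX : Xlist = [] := by
      rcases hpre with h | h
      · exact h
      · exact absurd hL h
    subst hX; subst hL
    rfl
  · -- main case: W > 0
    set W := Lst_WaterMark.length with hWdef
    have hW : 0 < W := by
      simp [hWdef, List.length_pos_iff]
      exact hL
    have hkX : ∀ c ∈ Xlist, c.length % W < W := fun c _ => Nat.mod_lt _ hW
    -- characterize A's counts
    have hstepA : (fun (p : List Int × List Int) (coords : List Int) =>
          if coords.length % 2 == 0 then (bump p.1 (coords.length % W) 1, p.2)
          else (p.1, bump p.2 (coords.length % W) 1))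
        = (fun p coords =>
            ((fun a (c : List Int) => if c.length % 2 == 0 then bump a (c.length % W) 1 else a) p.1 coords,
             (fun a (c : List Int) => if !(c.length % 2 == 0) then bump a (c.length % W) 1 else a) p.2 coords)) := by
      funext p c
      by_cases h : c.length % 2 == 0 <;> simp [h]
    have hcounts : countsLoopA W Xlist
        = (Xlist.foldl (fun a (c : List Int) => if c.length % 2 == 0 then bump a (c.length % W) 1 else a)
            (List.replicate W 0),
           Xlist.foldl (fun a (c : List Int) => if !(c.length % 2 == 0) then bump a (c.length % W) 1 else a)
            (List.replicate W 0)) := by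
      rw [countsLoopA, hstepA]
      exact PySem.List.foldl_prod_mk
        (fun a (c : List Int) => if c.length % 2 == 0 then bump a (c.length % W) 1 else a)
        (fun a (c : List Int) => if !(c.length % 2 == 0) then bump a (c.length % W) 1 else a)
        Xlist _ _
    have hce : ∀ m : Nat, (countsLoopA W Xlist).1.getD m 0
        = (Xlist.map (fun c => if (c.length % 2 == 0) = true ∧ m = c.length % W then (1:Int) else 0)).sum := by
      intro m
      rw [hcounts]
      rw [foldl_cbump_getD _ _ _ Xlist _ (by intro x hx; rw [List.length_replicate]; exact hkX x hx) m,
        getD_replicate_zero, zero_add]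
    have hco : ∀ m : Nat, (countsLoopA W Xlist).2.getD m 0
        = (Xlist.map (fun c => if (!(c.length % 2 == 0)) = true ∧ m = c.length % W then (1:Int) else 0)).sum := by
      intro m
      rw [hcounts]
      rw [foldl_cbump_getD _ _ _ Xlist _ (by intro x hx; rw [List.length_replicate]; exact hkX x hx) m,
        getD_replicate_zero, zero_add]
    -- characterize B's D and T
    have hdt : dtLoopB W Xlist
        = (Xlist.foldl (fun a (c : List Int) => bump a (c.length % W) (if c.length % 2 == 0 then 1 else -1))
            (List.replicate W 0),
           Xlist.foldl (fun a (c : List Int) => bump a (c.length % W) 1) (List.replicate W 0)) := by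
      rw [dtLoopB]
      exact PySem.List.foldl_prod_mk
        (fun a (c : List Int) => bump a (c.length % W) (if c.length % 2 == 0 then 1 else -1))
        (fun a (c : List Int) => bump a (c.length % W) 1)
        Xlist _ _
    have hDD : ∀ m : Nat, (dtLoopB W Xlist).1.getD m 0
        = (Xlist.map (fun c => if m = c.length % W then (if c.length % 2 == 0 then (1:Int) else -1) else 0)).sum := by
      intro m
      rw [hdt]
      rw [foldl_bump_getD' _ _ Xlist _ (by intro x hx; rw [List.length_replicate]; exact hkX x hx) m,
        getD_replicate_zero, zero_add]
    have hTT : ∀ m : Nat, (dtLoopB W Xlist).2.getD m 0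
        = (Xlist.map (fun c => if m = c.length % W then (1:Int) else 0)).sum := by
      intro m
      rw [hdt]
      rw [foldl_bump_getD' _ _ Xlist _ (by intro x hx; rw [List.length_replicate]; exact hkX x hx) m,
        getD_replicate_zero, zero_add]
    -- the three pointwise relations the core lemma needs
    have hnn : ∀ r : Nat, 0 ≤ (countsLoopA W Xlist).1.getD r 0 ∧ 0 ≤ (countsLoopA W Xlist).2.getD r 0 := by
      intro r
      constructor
      · rw [hce r]
        apply List.sum_nonneg
        intro x hx
        simp only [List.mem_map] at hx
        obtain ⟨c, _, rfl⟩ := hx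
        split <;> norm_num
      · rw [hco r]
        apply List.sum_nonneg
        intro x hx
        simp only [List.mem_map] at hx
        obtain ⟨c, _, rfl⟩ := hx
        split <;> norm_num
    have hDrel : ∀ r : Nat, (dtLoopB W Xlist).1.getD r 0
        = (countsLoopA W Xlist).1.getD r 0 - (countsLoopA W Xlist).2.getD r 0 := by
      intro r
      have hsum : (dtLoopB W Xlist).1.getD r 0 + (countsLoopA W Xlist).2.getD r 0
          = (countsLoopA W Xlist).1.getD r 0 := by
        rw [hDD r, hco r, hce r, ← PySem.List.sum_map_add_int]
        have hfg : (fun (c : List Int) =>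
              (if r = c.length % W then (if c.length % 2 == 0 then (1:Int) else -1) else 0)
                + (if (!(c.length % 2 == 0)) = true ∧ r = c.length % W then (1:Int) else 0))
            = (fun c => if (c.length % 2 == 0) = true ∧ r = c.length % W then (1:Int) else 0) := by
          funext c
          by_cases h1 : c.length % 2 == 0 <;> by_cases h2 : r = c.length % W <;> simp [h1, h2]
        rw [hfg]
      linarith
    have hTrel : ∀ r : Nat, (dtLoopB W Xlist).2.getD r 0
        = (countsLoopA W Xlist).1.getD r 0 + (countsLoopA W Xlist).2.getD r 0 := by
      intro r
      rw [hTT r, hco r, hce r, ← PySem.List.sum_map_add_int]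
      have hfg : (fun (c : List Int) =>
            (if (c.length % 2 == 0) = true ∧ r = c.length % W then (1:Int) else 0)
              + (if (!(c.length % 2 == 0)) = true ∧ r = c.length % W then (1:Int) else 0))
          = (fun c => if r = c.length % W then (1:Int) else 0) := by
        funext c
        by_cases h1 : c.length % 2 == 0 <;> by_cases h2 : r = c.length % W <;> simp [h1, h2]
      rw [hfg]
    have hz : ∀ r : Nat, (dtLoopB W Xlist).2.getD r 0 = 0 → (dtLoopB W Xlist).1.getD r 0 = 0 := by
      intro r h0
      have h1 := hTrel r
      have h2 := hDrel r
      have h3 := (hnn r).1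
      have h4 := (hnn r).2
      omega
    -- both accumulators as flat increment applications
    have hA : catPairLoop W (categoriesOf W (countsLoopA W Xlist).1 (countsLoopA W Xlist).2)
          (List.replicate W 0)
        = applyAll (List.replicate W 0)
            (contribsA W ((List.range W).flatMap
              (block (countsLoopA W Xlist).1 (countsLoopA W Xlist).2))) := by
      rw [catPairLoop_eq, categoriesOf_eq]
    have hB : accPairLoopB W (dtLoopB W Xlist).1 (dtLoopB W Xlist).2
          ((List.range W).filter (fun r => (dtLoopB W Xlist).2.getD r 0 != 0))
          (List.replicate W 0)
        = applyAll (List.replicate W 0)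
            (contribsB W (dtLoopB W Xlist).1 (dtLoopB W Xlist).2
              ((List.range W).filter (fun r => (dtLoopB W Xlist).2.getD r 0 != 0))) :=
      accPairLoopB_eq W _ _ _ _
    -- pointwise equality of the two accumulators
    have hacc : catPairLoop W (categoriesOf W (countsLoopA W Xlist).1 (countsLoopA W Xlist).2)
          (List.replicate W 0)
        = accPairLoopB W (dtLoopB W Xlist).1 (dtLoopB W Xlist).2
            ((List.range W).filter (fun r => (dtLoopB W Xlist).2.getD r 0 != 0))
            (List.replicate W 0) := by
      have hlenA : (applyAll (List.replicate W (0:Int))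
          (contribsA W ((List.range W).flatMap
            (block (countsLoopA W Xlist).1 (countsLoopA W Xlist).2)))).length = W := by
        rw [applyAll_length, List.length_replicate]
      have hlenB : (applyAll (List.replicate W (0:Int))
          (contribsB W (dtLoopB W Xlist).1 (dtLoopB W Xlist).2
            ((List.range W).filter (fun r => (dtLoopB W Xlist).2.getD r 0 != 0)))).length = W := by
        rw [applyAll_length, List.length_replicate]
      rw [hA, hB]
      have hgd : ∀ m : Nat,
          (applyAll (List.replicate W (0:Int))
            (contribsA W ((List.range W).flatMap
              (block (countsLoopA W Xlist).1 (countsLoopA W Xlist).2)))).getD m 0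
          = (applyAll (List.replicate W (0:Int))
              (contribsB W (dtLoopB W Xlist).1 (dtLoopB W Xlist).2
                ((List.range W).filter (fun r => (dtLoopB W Xlist).2.getD r 0 != 0)))).getD m 0 := by
        intro m
        rw [applyAll_getD _ _ (by
            intro kv hkv
            rw [List.length_replicate]
            exact contribsA_keys W hW _ kv hkv) m,
          applyAll_getD _ _ (by
            intro kv hkv
            rw [List.length_replicate]
            exact contribsB_keys W hW _ _ _ kv hkv) m,
          getD_replicate_zero, zero_add, zero_add,
          contribsB_filter W m _ _ hz (List.range W)]
        exact core W m _ _ _ _ hnn hDrel hTrel (List.range W)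
      apply List.ext_getElem (by rw [hlenA, hlenB])
      intro i h1 h2
      have := hgd i
      rwa [List.getD_eq_getElem _ _ h1, List.getD_eq_getElem _ _ h2] at this
    simp only [construction_fast, construction_fast_alt]
    rw [← hWdef, hacc]
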